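-- pv_equiv track=rewrite | github.com/Cellim01/ai-mevzuat | ai-service/scripts/ocr_utils.py | _has_long_black_run_1d
-- ===== SOURCE A (Python) =====
-- def _has_long_black_run_1d(values: list[int], min_run: int, max_white_gap: int = 2) -> bool:
--     """
--     Returns True if there is a long-enough black run while allowing tiny white gaps
--     (common in anti-aliased/scanned table borders).
--     values: 0 for black, 1 for white
--     """
--     run = 0
--     gap = 0
--     in_run = False
--
--     for v in values:
--         if v == 0:
--             if in_run:
--                 run += 1 + gap
--             else:
--                 in_run = True
--                 run = 1
--             gap = 0
--             if run >= min_run: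
--                 return True
--         else:
--             if in_run and gap < max_white_gap:
--                 gap += 1
--             else:
--                 in_run = False
--                 run = 0
--                 gap = 0
--     return False
-- ===== SOURCE B (Python) =====
-- def _has_long_black_run_1d(values: list[int], min_run: int, max_white_gap: int = 2) -> bool:
--     """
--     Run-length-encode the row first, then scan (is_black, count) groups with a
--     merged-segment / pending-gap state machine instead of per-element counters.
--     """
--     # build the run-length encoding: list of [is_black, count]
--     groups = []
--     for v in values:
--         k = (v == 0)
--         if groups and groups[-1][0] == k:
--             groups[-1][1] += 1
--         else:
--             groups.append([k, 1])
--     seg = 0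
--     pending = 0
--     in_seg = False
--     for is_black, n in groups:
--         if is_black:
--             seg = (seg + pending + n) if in_seg else n
--             in_seg = True
--             pending = 0
--             if seg >= min_run:
--                 return True
--         else:
--             if in_seg and n <= max_white_gap:
--                 pending = n
--             else:
--                 in_seg = False
--                 seg = 0
--                 pending = 0
--     return False
-- ===== Notes on version B (the rewrite author's own statement) =====
-- stated objective: alternative
-- what changed: B first run-length-encodes the row into (is_black,count) groups and then runs a group-level state machine (merged segment length + pending white gap) instead of A's per-element run/gap counters with an in-loop early return.
import Mathlib
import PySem

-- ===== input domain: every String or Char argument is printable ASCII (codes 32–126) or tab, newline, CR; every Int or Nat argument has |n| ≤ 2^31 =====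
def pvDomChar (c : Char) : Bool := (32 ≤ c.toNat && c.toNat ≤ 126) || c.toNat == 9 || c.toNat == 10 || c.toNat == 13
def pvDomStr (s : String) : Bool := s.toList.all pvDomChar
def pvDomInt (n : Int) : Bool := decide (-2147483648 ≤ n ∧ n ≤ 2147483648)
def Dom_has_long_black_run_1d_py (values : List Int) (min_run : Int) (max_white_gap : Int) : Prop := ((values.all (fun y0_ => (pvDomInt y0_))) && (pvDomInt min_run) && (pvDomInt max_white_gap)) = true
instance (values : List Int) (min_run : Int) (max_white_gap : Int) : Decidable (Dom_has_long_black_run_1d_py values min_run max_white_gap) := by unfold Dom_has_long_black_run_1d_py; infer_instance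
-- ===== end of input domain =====

-- B replaces A's per-element run/gap loop by a run-length encoding followed by a
-- group-level segment/pending-gap state machine (objective: alternative decomposition).

-- ===== PORT A =====
-- literal transliteration of A's element loop; early `return True` becomes returning `true`
def pvALoop (vs : List Int) (run gap : Int) (in_run : Bool) (min_run max_white_gap : Int) : Bool :=
  match vs with
  | [] => false
  | v :: rest =>
    if v == 0 then
      let run' := if in_run then run + 1 + gap else 1
      if run' ≥ min_run then true
      else pvALoop rest run' 0 true min_run max_white_gap
    else
      if in_run && decide (gap < max_white_gap) then
        pvALoop rest run (gap + 1) in_run min_run max_white_gap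
      else
        pvALoop rest 0 0 false min_run max_white_gap

def has_long_black_run_1d_py (values : List Int) (min_run : Int) (max_white_gap : Int) : Bool :=
  pvALoop values 0 0 false min_run max_white_gap

-- ===== PORT B =====
-- run-length encoding: current group (b, n) carried while scanning (Source B's groups list)
def pvRleGo (b : Bool) (n : Int) (vs : List Int) : List (Bool × Int) :=
  match vs with
  | [] => [(b, n)]
  | v :: rest =>
    if (v == 0) = b then pvRleGo b (n + 1) rest
    else (b, n) :: pvRleGo (v == 0) 1 rest

def pvRle (vs : List Int) : List (Bool × Int) :=
  match vs with
  | [] => []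
  | v :: rest => pvRleGo (v == 0) 1 rest

-- group-level state machine of Source B
def pvBLoop (gs : List (Bool × Int)) (seg pending : Int) (in_seg : Bool) (min_run max_white_gap : Int) : Bool :=
  match gs with
  | [] => false
  | (is_black, n) :: rest =>
    if is_black then
      let seg' := if in_seg then seg + pending + n else n
      if seg' ≥ min_run then true
      else pvBLoop rest seg' 0 true min_run max_white_gap
    else
      if in_seg && decide (n ≤ max_white_gap) then
        pvBLoop rest seg n in_seg min_run max_white_gap
      else
        pvBLoop rest 0 0 false min_run max_white_gap

def has_long_black_run_1d_py_alt (values : List Int) (min_run : Int) (max_white_gap : Int) : Bool :=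
  pvBLoop (pvRle values) 0 0 false min_run max_white_gap

-- ===== PRECONDITION & SPEC =====
def Spec_has_long_black_run_1d_py (values : List Int) (min_run : Int) (max_white_gap : Int) (out : Bool) : Prop := out = has_long_black_run_1d_py_alt values min_run max_white_gap
instance (values : List Int) (min_run : Int) (max_white_gap : Int) (out : Bool) : Decidable (Spec_has_long_black_run_1d_py values min_run max_white_gap out) := by unfold Spec_has_long_black_run_1d_py; infer_instance

-- ===== CLAIM (what is proved, stated in full; the proofs are below) =====
def Claim_equal_has_long_black_run_1d_py : Prop := ∀ (values : List Int) (min_run : Int) (max_white_gap : Int), Dom_has_long_black_run_1d_py values min_run max_white_gap → Spec_has_long_black_run_1d_py values min_run max_white_gap (has_long_black_run_1d_py values min_run max_white_gap)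

-- ===== LEMMAS AND PROOFS =====

-- If the segment reached so far inside a black group already meets min_run, B returns true.
theorem pvBLoop_rleGo_true (vs : List Int) : ∀ (n seg pending : Int) (in_seg : Bool) (mr mwg : Int),
    (if in_seg then seg + pending else 0) + n ≥ mr →
    pvBLoop (pvRleGo true n vs) seg pending in_seg mr mwg = true := by
  induction vs with
  | nil =>
    intro n seg pending in_seg mr mwg h
    simp only [pvRleGo, pvBLoop]
    cases in_seg <;> simp_all <;> omega
  | cons v rest ih =>
    intro n seg pending in_seg mr mwg h
    simp only [pvRleGo]
    by_cases hv : (v == 0) = true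
    · simp only [hv, if_pos rfl]
      exact ih (n + 1) seg pending in_seg mr mwg (by clear ih; cases in_seg <;> simp_all <;> omega)
    · have hv' : ((v == 0) = true) = False := by simp [hv]
      simp only [hv', if_false, pvBLoop]
      cases in_seg <;> simp_all <;> omega

-- Main invariant: A's element loop mid-group equals B's group loop on the remaining RLE.
theorem pvKey (vs : List Int) : ∀ (b : Bool) (n seg pending : Int) (in_seg : Bool)
    (run gap : Int) (in_run : Bool) (mr mwg : Int),
    (b = true → in_run = true ∧ gap = 0 ∧ run = (if in_seg then seg + pending else 0) + n ∧ run < mr ∧ 1 ≤ n) →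
    (b = false → 1 ≤ n ∧
      ((in_run = true ∧ run = seg ∧ gap = n ∧ n ≤ mwg ∧ in_seg = true ∧ pending = 0) ∨
       (in_run = false ∧ run = 0 ∧ gap = 0 ∧
         ((in_seg = false ∧ seg = 0 ∧ pending = 0) ∨ (in_seg = true ∧ pending = 0 ∧ mwg < n))))) →
    pvALoop vs run gap in_run mr mwg = pvBLoop (pvRleGo b n vs) seg pending in_seg mr mwg := by
  induction vs with
  | nil =>
    intro b n seg pending in_seg run gap in_run mr mwg hb hw
    cases b
    · simp [pvALoop, pvRleGo, pvBLoop]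
    · obtain ⟨h1, h2, h3, h4, _⟩ := hb rfl
      simp only [pvALoop, pvRleGo, pvBLoop]
      cases in_seg <;> simp_all <;> omega
  | cons v rest ih =>
    intro b n seg pending in_seg run gap in_run mr mwg hb hw
    simp only [pvALoop, pvRleGo]
    by_cases hv : (v == 0) = true
    · -- current element is black
      simp only [hv, eq_self_iff_true, Bool.false_eq_true, Bool.true_eq_false, if_true, if_false]
      cases b with
      | true =>
        -- black group continues
        obtain ⟨h1, h2, h3, h4, h5⟩ := hb rfl
        rw [h1, h2]
        simp only [eq_self_iff_true, Bool.false_eq_true, Bool.true_eq_false, if_true, if_false]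
        by_cases hmr : run + 1 + 0 ≥ mr
        · rw [if_pos hmr]
          exact (pvBLoop_rleGo_true rest (n+1) seg pending in_seg mr mwg
            (by clear ih; cases in_seg <;> simp_all <;> omega)).symm
        · rw [if_neg hmr]
          exact ih true (n + 1) seg pending in_seg (run + 1 + 0) 0 true mr mwg
            (fun _ => ⟨rfl, rfl, by clear ih; cases in_seg <;> simp_all <;> omega, by omega, by omega⟩)
            (by simp)
      | false =>
        -- a white group ends, a black group starts
        obtain ⟨hn1, hcase⟩ := hw rfl
        simp only [pvBLoop, eq_self_iff_true, Bool.false_eq_true, Bool.true_eq_false, if_true, if_false]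
        rcases hcase with ⟨h1, h2, h3, h4, h5, h6⟩ | ⟨h1, h2, h3, hrest⟩
        · -- tolerated white gap: B keeps the segment and records pending := n
          rw [h1, h5]
          simp only [eq_self_iff_true, Bool.false_eq_true, Bool.true_eq_false, if_true, if_false]
          rw [if_pos (show (true && decide (n ≤ mwg)) = true by simp; omega)]
          by_cases hmr : run + 1 + gap ≥ mr
          · rw [if_pos hmr]
            exact (pvBLoop_rleGo_true rest 1 seg n true mr mwg (by simp; omega)).symm
          · rw [if_neg hmr]
            exact ih true 1 seg n true (run + 1 + gap) 0 true mr mwg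
              (fun _ => ⟨rfl, rfl, by simp; omega, by omega, by omega⟩) (by simp)
        · -- both sides are in the reset state
          rw [h1]
          simp only [eq_self_iff_true, Bool.false_eq_true, Bool.true_eq_false, if_true, if_false]
          have hB : (in_seg && decide (n ≤ mwg)) = false := by
            rcases hrest with ⟨hi, _, _⟩ | ⟨hi, _, hmg⟩ <;> subst hi <;> simp <;> omega
          rw [if_neg (show ¬ ((in_seg && decide (n ≤ mwg)) = true) by simp [hB])]
          by_cases hmr : (1 : Int) ≥ mr
          · rw [if_pos hmr]
            exact (pvBLoop_rleGo_true rest 1 0 0 false mr mwg (by simp; omega)).symm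
          · rw [if_neg hmr]
            exact ih true 1 0 0 false 1 0 true mr mwg
              (fun _ => ⟨rfl, rfl, by simp, by omega, by omega⟩) (by simp)
    · -- current element is white
      have hvb : (v == 0) = false := by simpa using hv
      simp only [hvb, eq_self_iff_true, Bool.false_eq_true, Bool.true_eq_false, if_true, if_false]
      cases b with
      | true =>
        -- the black group ends here; B consumes it (its check fails since run < mr)
        obtain ⟨h1, h2, h3, h4, _⟩ := hb rfl
        rw [h1, h2]
        simp only [pvBLoop, eq_self_iff_true, Bool.false_eq_true, Bool.true_eq_false, if_true, if_false]
        rw [if_neg (show ¬ ((if in_seg then seg + pending + n else n) ≥ mr) by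
          clear ih; cases in_seg <;> simp_all <;> omega)]
        by_cases hg : (0 : Int) < mwg
        · rw [if_pos (show (true && decide ((0:Int) < mwg)) = true by simp; omega)]
          exact ih false 1 (if in_seg then seg + pending + n else n) 0 true run (0 + 1) true mr mwg
            (by simp) (fun _ => ⟨by omega, Or.inl ⟨rfl, by clear ih; cases in_seg <;> simp_all <;> omega,
              by omega, by omega, rfl, rfl⟩⟩)
        · rw [if_neg (show ¬ ((true && decide ((0:Int) < mwg)) = true) by simp; omega)]
          exact ih false 1 (if in_seg then seg + pending + n else n) 0 true 0 0 false mr mwg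
            (by simp) (fun _ => ⟨by omega, Or.inr ⟨rfl, rfl, rfl, Or.inr ⟨rfl, rfl, by omega⟩⟩⟩)
      | false =>
        -- white group continues
        obtain ⟨hn1, hcase⟩ := hw rfl
        simp only [eq_self_iff_true, Bool.false_eq_true, Bool.true_eq_false, if_true, if_false]
        rcases hcase with ⟨h1, h2, h3, h4, h5, h6⟩ | ⟨h1, h2, h3, hrest⟩
        · -- still inside the tolerated white group
          rw [h1]
          by_cases hg : n < mwg
          · rw [if_pos (show (true && decide (gap < mwg)) = true by simp; omega)]
            exact ih false (n + 1) seg pending in_seg run (gap + 1) true mr mwg (by simp)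
              (fun _ => ⟨by omega, Or.inl ⟨rfl, h2, by omega, by omega, h5, h6⟩⟩)
          · rw [if_neg (show ¬ ((true && decide (gap < mwg)) = true) by simp; omega)]
            exact ih false (n + 1) seg pending in_seg 0 0 false mr mwg (by simp)
              (fun _ => ⟨by omega, Or.inr ⟨rfl, rfl, rfl, Or.inr ⟨h5, h6, by omega⟩⟩⟩)
        · -- already reset: stays reset
          rw [h1]
          rw [if_neg (show ¬ ((false && decide (gap < mwg)) = true) by simp)]
          refine ih false (n + 1) seg pending in_seg 0 0 false mr mwg (by simp)
            (fun _ => ⟨by omega, Or.inr ⟨rfl, rfl, rfl, ?_⟩⟩)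
          rcases hrest with ⟨hi, hs, hp⟩ | ⟨hi, hp, hmg⟩
          · exact Or.inl ⟨hi, hs, hp⟩
          · exact Or.inr ⟨hi, hp, by omega⟩

-- ===== VERDICT (by name: the statement is the Claim_ definition above) =====
theorem has_long_black_run_1d_py_spec : Claim_equal_has_long_black_run_1d_py := by
  unfold Claim_equal_has_long_black_run_1d_py
  intro values mr mwg _
  unfold Spec_has_long_black_run_1d_py has_long_black_run_1d_py has_long_black_run_1d_py_alt
  cases values with
  | nil => simp [pvALoop, pvRle, pvBLoop]
  | cons v rest =>
    simp only [pvALoop, pvRle]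
    by_cases hv : (v == 0) = true
    · simp only [if_pos hv, hv, Bool.false_eq_true, if_false]
      by_cases hmr : (1 : Int) ≥ mr
      · rw [if_pos hmr]
        exact (pvBLoop_rleGo_true rest 1 0 0 false mr mwg (by simp; omega)).symm
      · rw [if_neg hmr]
        exact pvKey rest true 1 0 0 false 1 0 true mr mwg
          (fun _ => ⟨rfl, rfl, by simp, by omega, by omega⟩) (by simp)
    · have hvb : (v == 0) = false := by simpa using hv
      simp only [hv, if_false, hvb, Bool.false_and]
      exact pvKey rest false 1 0 0 false 0 0 false mr mwg (by simp)
        (fun _ => ⟨by omega, Or.inr ⟨rfl, rfl, rfl, Or.inl ⟨rfl, rfl, rfl⟩⟩⟩)
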